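-- pv_equiv track=rewrite | github.com/imfifc/myocr | ocr_structuring/core/template/parser_mixin/shanghai_invoice_mixin.py | get_label_split_number_text
-- ===== SOURCE A (Python) =====
-- def get_label_split_number_text(label_text):
--     """
--         以其他字符为分隔符，将数字部分分别提取出来
--     """
--     now_text = ''
--     split_text = []
--     # div_flag = False
--     for c in label_text:
--         if str.isnumeric(c):
--             now_text += c
--         elif len(now_text) > 0:
--             split_text.append(now_text)
--             now_text = ''
--     if len(now_text) > 0:
--         split_text.append(now_text)
--     return split_text
-- ===== SOURCE B (Python) =====
-- def get_label_split_number_text(label_text):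
--     """Blank out every non-numeric character, then let str.split() cut out the runs."""
--     return ''.join(c if str.isnumeric(c) else ' ' for c in label_text).split()
-- ===== Notes on version B (the rewrite author's own statement) =====
-- stated objective: alternative
-- what changed: Two-stage pipeline: map every non-numeric character to a space, then delegate the run extraction to str.split(), instead of A's explicit buffer/flush accumulator loop.
import Mathlib
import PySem

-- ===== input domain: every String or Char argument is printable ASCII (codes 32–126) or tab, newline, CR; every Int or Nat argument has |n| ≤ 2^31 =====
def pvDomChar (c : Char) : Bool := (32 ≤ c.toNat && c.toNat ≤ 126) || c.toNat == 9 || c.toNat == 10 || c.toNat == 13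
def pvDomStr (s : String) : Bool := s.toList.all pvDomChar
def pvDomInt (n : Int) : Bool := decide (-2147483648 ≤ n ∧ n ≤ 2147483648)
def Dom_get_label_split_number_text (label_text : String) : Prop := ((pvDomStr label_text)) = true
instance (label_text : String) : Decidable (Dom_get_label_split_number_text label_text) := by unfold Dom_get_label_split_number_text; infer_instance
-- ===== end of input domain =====

-- B replaces A's buffer/flush accumulator loop by a two-stage pipeline: blank out
-- non-numeric characters, then split on whitespace (alternative decomposition; same cost).

-- ===== PORT A =====
-- str.isnumeric is ported as PySem.Chars.isdigit: exact on the printable-ASCII domain Dom_, where isnumeric ⇔ isdigit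
def pvAStep (st : List Char × List String) (c : Char) : List Char × List String :=
  if PySem.Chars.isdigit c then (st.1 ++ [c], st.2)
  else if st.1.length > 0 then ([], st.2 ++ [String.ofList st.1])
  else st

def pvAFinish (st : List Char × List String) : List String :=
  if st.1.length > 0 then st.2 ++ [String.ofList st.1] else st.2

def get_label_split_number_text (label_text : String) : List String :=
  pvAFinish (label_text.toList.foldl pvAStep ([], []))

-- ===== PORT B =====
-- ''.join(c if str.isnumeric(c) else ' ' for c in label_text).split()
def get_label_split_number_text_alt (label_text : String) : List String :=
  PySem.Str.split₀
    (String.ofList (label_text.toList.map (fun c => if PySem.Chars.isdigit c then c else ' ')))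

-- ===== PRECONDITION & SPEC =====
def Spec_get_label_split_number_text (label_text : String) (out : List String) : Prop := out = get_label_split_number_text_alt label_text
instance (label_text : String) (out : List String) : Decidable (Spec_get_label_split_number_text label_text out) := by unfold Spec_get_label_split_number_text; infer_instance

-- ===== CLAIM (what is proved, stated in full; the proofs are below) =====
def Claim_equal_get_label_split_number_text : Prop := ∀ (label_text : String), Dom_get_label_split_number_text label_text → Spec_get_label_split_number_text label_text (get_label_split_number_text label_text)

-- ===== LEMMAS AND PROOFS =====

-- the per-character blanking map of B
def pvBlank (c : Char) : Char := if PySem.Chars.isdigit c then c else ' '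

theorem pvIsspace_blank (c : Char) : PySem.Chars.isspace (pvBlank c) = !PySem.Chars.isdigit c := by
  by_cases h : PySem.Chars.isdigit c = true
  · have h0 : '0' ≤ c ∧ c ≤ '9' := by simpa [PySem.Chars.isdigit] using h
    have hlo : 48 ≤ c.toNat := h0.1
    have hhi : c.toNat ≤ 57 := h0.2
    simp only [pvBlank, h, if_true, Bool.not_true, PySem.Chars.isspace]
    simp only [Bool.or_eq_false_iff, Bool.and_eq_false_iff, decide_eq_false_iff_not]
    omega
  · simp only [Bool.not_eq_true] at h
    simp [pvBlank, h, PySem.Chars.isspace]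

-- main invariant: A's loop state (buffer now, emitted split) matches split₀.go's
-- state (reversed buffer cur = now.reverse, reversed emitted acc)
theorem pvMain : ∀ (cs now : List Char) (acc : List (List Char)),
    pvAFinish (cs.foldl pvAStep (now, acc.reverse.map String.ofList)) =
      (PySem.Chars.split₀.go (cs.map pvBlank) now.reverse acc).map String.ofList := by
  intro cs
  induction cs with
  | nil =>
    intro now acc
    cases now with
    | nil => simp [pvAFinish, PySem.Chars.split₀.go]
    | cons d ds => simp [pvAFinish, PySem.Chars.split₀.go]
  | cons c cs' ih =>
    intro now acc
    by_cases hc : PySem.Chars.isdigit c = true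
    · have hbl : pvBlank c = c := by simp [pvBlank, hc]
      have hsp : PySem.Chars.isspace c = false := by
        have := pvIsspace_blank c; rw [hbl, hc] at this; simpa using this
      have step : pvAStep (now, acc.reverse.map String.ofList) c
          = (now ++ [c], acc.reverse.map String.ofList) := by simp [pvAStep, hc]
      rw [List.foldl_cons, step]
      have := ih (now ++ [c]) acc
      simpa [PySem.Chars.split₀.go, hbl, hsp] using this
    · simp only [Bool.not_eq_true] at hc
      have hsp : PySem.Chars.isspace ' ' = true := by decide
      cases now with
      | nil =>
        have step : pvAStep ([], acc.reverse.map String.ofList) c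
            = ([], acc.reverse.map String.ofList) := by simp [pvAStep, hc]
        rw [List.foldl_cons, step]
        have := ih [] acc
        simpa [PySem.Chars.split₀.go, pvBlank, hc, hsp] using this
      | cons d ds =>
        have step : pvAStep (d :: ds, acc.reverse.map String.ofList) c
            = ([], acc.reverse.map String.ofList ++ [String.ofList (d :: ds)]) := by
          simp [pvAStep, hc]
        rw [List.foldl_cons, step]
        have := ih [] ((d :: ds) :: acc)
        simpa [PySem.Chars.split₀.go, pvBlank, hc, hsp] using this

-- ===== VERDICT (by name: the statement is the Claim_ definition above) =====
theorem get_label_split_number_text_spec : Claim_equal_get_label_split_number_text := by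
  intro s _
  unfold Spec_get_label_split_number_text get_label_split_number_text get_label_split_number_text_alt
  have := pvMain s.toList [] []
  simpa [PySem.Str.split₀, PySem.Chars.split₀, pvBlank] using this
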